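-- pv_equiv track=rewrite | github.com/caseyli01/vlx_mofbuilder | src/MOF_builder/v2_functions.py | update_matched_nodes
-- ===== SOURCE A (Python) =====
-- def update_matched_nodes(removed_nodes, removed_edges, matched_vnode_xind):
--     # if linked edge is removed and the connected node is not removed, then remove this line from matched_vnode_xind
--     # add remove the middle xind of the node to matched_vnode_xind_dict[node] list
--     to_remove_row = []
--
--     for i in range(len(matched_vnode_xind)):
--         node, xind, edge = matched_vnode_xind[i]
--         if edge in removed_edges and node not in removed_nodes:
--             to_remove_row.append(i)
--         elif node in removed_nodes:
--             to_remove_row.append(i)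
--     # remove the rows
--     matched_vnode_xind = [
--         i for j, i in enumerate(matched_vnode_xind) if j not in to_remove_row
--     ]
--     return matched_vnode_xind
-- ===== SOURCE B (Python) =====
-- def update_matched_nodes(removed_nodes, removed_edges, matched_vnode_xind):
--     # single forward pass: keep a row iff its node and its edge survive
--     kept = []
--     for row in matched_vnode_xind:
--         node, xind, edge = row
--         if node not in removed_nodes and edge not in removed_edges:
--             kept.append(row)
--     return kept
-- ===== Notes on version B (the rewrite author's own statement) =====
-- stated objective: simpler
-- what changed: Replaces A's two passes (collect removal indices by range/indexing, then re-filter by enumerate against that index list) with one direct pass that appends a row iff its node and edge are not removed.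
import Mathlib
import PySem

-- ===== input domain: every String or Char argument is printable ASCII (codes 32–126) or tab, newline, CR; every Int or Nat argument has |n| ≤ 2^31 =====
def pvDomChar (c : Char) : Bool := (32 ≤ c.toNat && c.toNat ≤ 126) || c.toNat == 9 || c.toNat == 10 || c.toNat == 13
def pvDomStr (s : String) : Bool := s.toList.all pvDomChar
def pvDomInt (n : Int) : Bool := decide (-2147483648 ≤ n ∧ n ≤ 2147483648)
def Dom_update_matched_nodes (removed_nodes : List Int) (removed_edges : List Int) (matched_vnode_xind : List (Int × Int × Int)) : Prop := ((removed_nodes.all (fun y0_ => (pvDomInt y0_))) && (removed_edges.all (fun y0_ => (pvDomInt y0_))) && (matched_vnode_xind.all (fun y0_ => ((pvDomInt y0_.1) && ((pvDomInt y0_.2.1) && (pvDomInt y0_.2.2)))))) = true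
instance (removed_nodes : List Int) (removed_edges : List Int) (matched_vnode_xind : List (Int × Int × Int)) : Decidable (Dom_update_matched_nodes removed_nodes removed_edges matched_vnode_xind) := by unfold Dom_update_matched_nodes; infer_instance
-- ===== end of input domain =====

-- One honest line: B replaces A's two index-based passes (collect removal indices, then
-- re-filter by enumeration against that list) with one direct pass keeping surviving rows (simpler).

-- ===== PORT A =====
-- Literal port of A: first loop over range(len(xs)) building the index list to_remove_row,
-- then the comprehension over enumerate(xs) dropping the collected indices.
def update_matched_nodes (removed_nodes : List Int) (removed_edges : List Int) (matched_vnode_xind : List (Int × Int × Int)) : List (Int × Int × Int) :=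
  let to_remove_row : List Int :=
    (PySem.List.pyRange 0 (matched_vnode_xind.length : Int) 1).foldl
      (fun acc i =>
        let row := PySem.List.pyGetD matched_vnode_xind i (0, 0, 0)  -- index i ∈ range(len), always in range
        if row.2.2 ∈ removed_edges ∧ row.1 ∉ removed_nodes then acc ++ [i]
        else if row.1 ∈ removed_nodes then acc ++ [i]
        else acc) []
  (PySem.List.enumerate matched_vnode_xind).foldl
    (fun acc ji => if ji.1 ∈ to_remove_row then acc else acc ++ [ji.2]) []

-- ===== PORT B =====
-- Literal port of B: a single pass appending each surviving row.
def update_matched_nodes_alt (removed_nodes : List Int) (removed_edges : List Int) (matched_vnode_xind : List (Int × Int × Int)) : List (Int × Int × Int) :=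
  matched_vnode_xind.foldl
    (fun kept row =>
      if row.1 ∉ removed_nodes ∧ row.2.2 ∉ removed_edges then kept ++ [row] else kept) []

-- ===== PRECONDITION & SPEC =====
def Spec_update_matched_nodes (removed_nodes : List Int) (removed_edges : List Int) (matched_vnode_xind : List (Int × Int × Int)) (out : List (Int × Int × Int)) : Prop := out = update_matched_nodes_alt removed_nodes removed_edges matched_vnode_xind
instance (removed_nodes : List Int) (removed_edges : List Int) (matched_vnode_xind : List (Int × Int × Int)) (out : List (Int × Int × Int)) : Decidable (Spec_update_matched_nodes removed_nodes removed_edges matched_vnode_xind out) := by unfold Spec_update_matched_nodes; infer_instance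

-- ===== CLAIM (what is proved, stated in full; the proofs are below) =====
def Claim_equal_update_matched_nodes : Prop := ∀ (removed_nodes : List Int) (removed_edges : List Int) (matched_vnode_xind : List (Int × Int × Int)), Dom_update_matched_nodes removed_nodes removed_edges matched_vnode_xind → Spec_update_matched_nodes removed_nodes removed_edges matched_vnode_xind (update_matched_nodes removed_nodes removed_edges matched_vnode_xind)

-- ===== LEMMAS AND PROOFS =====

-- The Boolean "this row is removed" test shared by the characterisations of both ports.
def pvCond (removed_nodes removed_edges : List Int) (row : Int × Int × Int) : Bool :=
  decide (row.1 ∈ removed_nodes) || decide (row.2.2 ∈ removed_edges)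

-- A's to_remove_row is exactly the in-range indices whose row satisfies pvCond.
theorem to_remove_row_eq (rn re : List Int) (xs : List (Int × Int × Int)) :
    (PySem.List.pyRange 0 (xs.length : Int) 1).foldl
      (fun acc i =>
        let row := PySem.List.pyGetD xs i (0, 0, 0)
        if row.2.2 ∈ re ∧ row.1 ∉ rn then acc ++ [i]
        else if row.1 ∈ rn then acc ++ [i]
        else acc) []
    = (PySem.List.pyRange 0 (xs.length : Int) 1).filter
        (fun i => pvCond rn re (PySem.List.pyGetD xs i (0, 0, 0))) := by
  have hfun : (fun (acc : List Int) (i : Int) =>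
        let row := PySem.List.pyGetD xs i (0, 0, 0)
        if row.2.2 ∈ re ∧ row.1 ∉ rn then acc ++ [i]
        else if row.1 ∈ rn then acc ++ [i]
        else acc)
      = (fun acc i => if pvCond rn re (PySem.List.pyGetD xs i (0, 0, 0)) then acc ++ [i] else acc) := by
    funext acc i
    simp only [pvCond]
    split_ifs with h1 h2 h3 h3 <;> simp_all
  rw [hfun]
  simpa using PySem.List.foldl_append_if
    (fun i => pvCond rn re (PySem.List.pyGetD xs i (0, 0, 0))) id _ _

-- membership in to_remove_row
theorem mem_to_remove (rn re : List Int) (xs : List (Int × Int × Int)) (j : Int) :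
    (j ∈ (PySem.List.pyRange 0 (xs.length : Int) 1).filter
        (fun i => pvCond rn re (PySem.List.pyGetD xs i (0, 0, 0))))
    ↔ (0 ≤ j ∧ j < (xs.length : Int) ∧ pvCond rn re (PySem.List.pyGetD xs j (0, 0, 0)) = true) := by
  simp [List.mem_filter, PySem.List.mem_pyRange_one, and_assoc]

-- A's second pass, run over the enumeration of the suffix of xs starting at index pre.length,
-- keeps exactly the suffix rows whose pvCond is false.
theorem enum_pass (rn re : List Int) (xs pre suf : List (Int × Int × Int))
    (hx : xs = pre ++ suf) :
    ∀ (acc : List (Int × Int × Int)),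
    (PySem.List.enumerate suf (pre.length : Int)).foldl
      (fun acc ji =>
        if ji.1 ∈ (PySem.List.pyRange 0 (xs.length : Int) 1).filter
            (fun i => pvCond rn re (PySem.List.pyGetD xs i (0, 0, 0))) then acc
        else acc ++ [ji.2]) acc
    = acc ++ suf.filter (fun row => !pvCond rn re row) := by
  induction suf generalizing pre with
  | nil => intro acc; simp [PySem.List.enumerate_nil]
  | cons x t ih =>
    intro acc
    have hget : PySem.List.pyGetD xs (pre.length : Int) (0, 0, 0) = x := by
      subst hx
      simp [PySem.List.pyGetD]
    have hmem : ((pre.length : Int) ∈ (PySem.List.pyRange 0 (xs.length : Int) 1).filter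
        (fun i => pvCond rn re (PySem.List.pyGetD xs i (0, 0, 0))))
        ↔ pvCond rn re x = true := by
      rw [mem_to_remove, hget]
      subst hx
      constructor
      · exact fun h => h.2.2
      · intro h
        refine ⟨by positivity, ?_, h⟩
        simp
    rw [PySem.List.enumerate_cons]
    simp only [List.foldl_cons]
    have hrec := ih (pre ++ [x]) (by simp [hx]) 
    have hlen : ((pre ++ [x]).length : Int) = (pre.length : Int) + 1 := by simp
    rw [hlen] at hrec
    by_cases hc : pvCond rn re x = true
    · rw [if_pos (hmem.mpr hc), hrec, List.filter_cons]
      simp [hc]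
    · have hc' : pvCond rn re x = false := by simpa using hc
      rw [if_neg (fun h => hc (hmem.mp h)), hrec, List.filter_cons]
      simp [hc']

-- A computes the filter by !pvCond.
theorem portA_eq_filter (rn re : List Int) (xs : List (Int × Int × Int)) :
    update_matched_nodes rn re xs = xs.filter (fun row => !pvCond rn re row) := by
  unfold update_matched_nodes
  rw [to_remove_row_eq]
  have := enum_pass rn re xs [] xs (by simp) []
  simpa using this

-- B computes the same filter.
theorem portB_eq_filter (rn re : List Int) (xs : List (Int × Int × Int)) :
    update_matched_nodes_alt rn re xs = xs.filter (fun row => !pvCond rn re row) := by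
  unfold update_matched_nodes_alt
  rw [PySem.List.foldl_append_ite_eq_filter]
  simp only [List.nil_append]
  apply List.filter_congr
  intro row _
  simp [pvCond, decide_not]

-- ===== VERDICT (by name: the statement is the Claim_ definition above) =====
theorem update_matched_nodes_spec : Claim_equal_update_matched_nodes := by
  intro rn re xs _
  unfold Spec_update_matched_nodes
  rw [portA_eq_filter, portB_eq_filter]
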